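-- pv_equiv track=rewrite | github.com/slackydev/Rafiki | src/lib/lists.py | group_ex
-- ===== SOURCE A (Python) =====
-- class UnionFind:
--     """ Union-find data structure.
--         @note: Items must be hashable.
--     """
--     def __init__(self):
--         """ Create a new empty union-find structure """
--         self.weights = {}
--         self.parents = {}
--
--     def __getitem__(self, obj):
--         """ X[item] will return the token object of the set which contains `item` """
--
--         # check for previously unknown object
--         if obj not in self.parents:
--             self.parents[obj] = obj
--             self.weights[obj] = 1
--             return obj
--
--         # find path of objects leading to the root
--         path = [obj]
--         root = self.parents[obj]
--         while root != path[-1]: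
--             path.append(root)
--             root = self.parents[root]
--
--         # compress the path and return
--         for ancestor in path:
--             self.parents[ancestor] = root
--         return root
--
--     def union(self, obj1, obj2):
--         """ Merges sets containing obj1 and obj2.
--         """
--         roots = [self[obj1], self[obj2]]
--         heavier = max([(self.weights[r],r) for r in roots])[1]
--         for r in roots:
--             if r != heavier:
--                 self.weights[heavier] += self.weights[r]
--                 self.parents[r] = heavier
--
-- def group_ex(pts, distx=1, disty=1):
--     """ Group points by max distance,
--         Resulting in nested lists of points.
--     """
--     U = UnionFind()
--     for (i, o1) in enumerate(pts):
--         for j in range(i + 1, len(pts)):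
--             o2 = pts[j]
--             if abs(o1[0] - o2[0]) <= distx and abs(o1[1] - o2[1]) <= disty:
--                 U.union(o1, o2)
--
--     sets = {}
--     for pt in pts:
--         s = sets.get(U[pt], set())
--         s.add(pt)
--         sets[U[pt]] = s
--
--     return [list(x) for x in sets.values()]
-- ===== SOURCE B (Python) =====
-- def group_ex(pts, distx=1, disty=1):
--     """ Group points by max distance,
--         Resulting in nested lists of points.
--
--         Flat-label grouping: every point carries its class representative
--         directly (no parent forest, no path compression); a merge relabels
--         the smaller class eagerly, ties broken by the larger representative.
--     """
--     label = {}   # point -> representative of its class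
--     size = {}    # representative -> number of distinct points in its class
--     def ensure(p):
--         if p not in label:
--             label[p] = p
--             size[p] = 1
--     n = len(pts)
--     for i, o1 in enumerate(pts):
--         for j in range(i + 1, n):
--             o2 = pts[j]
--             if abs(o1[0] - o2[0]) <= distx and abs(o1[1] - o2[1]) <= disty:
--                 ensure(o1)
--                 ensure(o2)
--                 r1, r2 = label[o1], label[o2]
--                 if r1 != r2:
--                     if (size[r1], r1) >= (size[r2], r2):
--                         heavy, light = r1, r2
--                     else:
--                         heavy, light = r2, r1
--                     for q in label:
--                         if label[q] == light:
--                             label[q] = heavy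
--                     size[heavy] += size.pop(light)
--     groups = {}
--     for pt in pts:
--         ensure(pt)
--         s = groups.get(label[pt], set())
--         s.add(pt)
--         groups[label[pt]] = s
--     return [list(x) for x in groups.values()]
-- ===== Notes on version B (the rewrite author's own statement) =====
-- stated objective: alternative
-- what changed: B drops A's union-find forest (parent pointers, weights dict, recursive find with path compression) and instead keeps a flat point-to-representative label map merged by eagerly relabeling the smaller class into the larger on each close pair, then groups by label.
import Mathlib
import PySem

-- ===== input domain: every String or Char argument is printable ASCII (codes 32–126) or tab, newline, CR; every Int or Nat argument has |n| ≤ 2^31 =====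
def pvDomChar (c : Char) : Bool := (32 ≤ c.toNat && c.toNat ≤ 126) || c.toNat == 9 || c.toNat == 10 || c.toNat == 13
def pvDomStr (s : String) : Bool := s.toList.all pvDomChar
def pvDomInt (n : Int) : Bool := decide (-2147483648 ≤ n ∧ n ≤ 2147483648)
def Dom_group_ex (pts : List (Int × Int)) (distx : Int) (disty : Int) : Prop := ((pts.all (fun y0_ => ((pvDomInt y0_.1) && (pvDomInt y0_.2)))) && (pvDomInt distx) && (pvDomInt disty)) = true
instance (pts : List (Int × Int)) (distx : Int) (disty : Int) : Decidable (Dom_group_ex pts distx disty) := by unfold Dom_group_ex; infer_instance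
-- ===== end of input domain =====

-- B replaces A's union-find forest (parent pointers, weights, path compression) by a flat
-- point→representative map merged by eager small-into-large relabeling: an alternative
-- algorithm of similar cost, with no recursive find step.

-- ---- shared transliterations of Python built-ins used by both ports ----
-- ---- CPython 'set' internals, shared transliteration used by both ports' final list(set) step ----
-- hash(n) for an int with |n| ≤ 2^31 (the stated domain): n itself, except hash(-1) = -2
def pyHashInt (n : Int) : Int := if n = -1 then -2 else n

def u64ofInt (n : Int) : UInt64 := UInt64.ofNat (n.emod 18446744073709551616).toNat

def rotl31 (a : UInt64) : UInt64 := (a <<< 31) ||| (a >>> 33)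

-- CPython's tuple hash (pyhash.c xxrotate variant) of a pair of ints, as the raw 64-bit word
def pyHashPair (p : Int × Int) : UInt64 :=
  let step : UInt64 → Int → UInt64 := fun acc h =>
    (rotl31 (acc + u64ofInt h * 14029467366897019727)) * 11400714785074694791
  let acc := step (step 2870177450012600261 (pyHashInt p.1)) (pyHashInt p.2)
  let acc := acc + (2 ^^^ (2870177450012600261 ^^^ 3527539 : UInt64))
  if acc = 18446744073709551615 then 1546275796 else acc

-- one linear window of set_add_entry: scan slots j, j+1, … (c slots): first unused slot or the key itself
def setScanWin (table : Array (Option ((Int × Int) × UInt64))) (key : Int × Int) (h : UInt64) :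
    Nat → Nat → Option (Nat × Bool)
  | _, 0 => none
  | j, c + 1 =>
    match table[j]? with
    | some none => some (j, false)
    | some (some e) => if e.2 = h ∧ e.1 = key then some (j, true) else setScanWin table key h (j + 1) c
    | none => none  -- out of range: unreachable (j ≤ mask by construction)

-- set_add_entry's probe loop: (slot, already-present?)
def setFindSlot (table : Array (Option ((Int × Int) × UInt64))) (mask : Nat) (key : Int × Int) (h : UInt64) :
    Nat → Nat → Nat → Nat × Bool
  | 0, i, _ => (i, false)  -- fuel exhausted: unreachable (the table always has an unused slot)
  | fuel + 1, i, perturb =>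
    let probes := if i + 9 ≤ mask then 9 else 0
    match setScanWin table key h i (probes + 1) with
    | some r => r
    | none => setFindSlot table mask key h fuel ((i * 5 + 1 + perturb / 32) % (mask + 1)) (perturb / 32)

-- one window of set_insert_clean: first unused slot
def setCleanWin (table : Array (Option ((Int × Int) × UInt64))) : Nat → Nat → Option Nat
  | _, 0 => none
  | j, c + 1 =>
    match table[j]? with
    | some none => some j
    | some (some _) => setCleanWin table (j + 1) c
    | none => none

def setInsertClean (mask : Nat) (key : Int × Int) (h : UInt64) :
    Array (Option ((Int × Int) × UInt64)) → Nat → Nat → Nat → Array (Option ((Int × Int) × UInt64))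
  | table, 0, _, _ => table
  | table, fuel + 1, i, perturb =>
    let probes := if i + 9 ≤ mask then 9 else 0
    match setCleanWin table i (probes + 1) with
    | some j => table.set! j (some (key, h))
    | none => setInsertClean mask key h table fuel ((i * 5 + 1 + perturb / 32) % (mask + 1)) (perturb / 32)

-- 'newsize = 8; while newsize <= minused: newsize <<= 1'
def setGrowSize : Nat → Nat → Nat → Nat
  | 0, newsize, _ => newsize
  | fuel + 1, newsize, minused => if newsize ≤ minused then setGrowSize fuel (newsize * 2) minused else newsize

-- set_table_resize: rehash every active entry, in slot order, into a fresh table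
def pySetResize (table : Array (Option ((Int × Int) × UInt64))) (used minused : Nat) :
    Array (Option ((Int × Int) × UInt64)) × Nat × Nat :=
  let newsize := setGrowSize (minused + 1) 8 minused
  let nt := table.foldl (fun nt e =>
      match e with
      | none => nt
      | some (k, h) => setInsertClean (newsize - 1) k h nt (2 * newsize + 20) (h.toNat % newsize) h.toNat)
    ((List.replicate newsize (none : Option ((Int × Int) × UInt64))).toArray)
  (nt, used, used)

-- set_add_entry on state (table, fill, used)
def pySetAdd (st : Array (Option ((Int × Int) × UInt64)) × Nat × Nat) (key : Int × Int) :
    Array (Option ((Int × Int) × UInt64)) × Nat × Nat :=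
  let h := pyHashPair key
  let mask := st.1.size - 1
  let fs := setFindSlot st.1 mask key h (2 * st.1.size + 20) (h.toNat % (mask + 1)) h.toNat
  if fs.2 then st
  else
    let table := st.1.set! fs.1 (some (key, h))
    let fill := st.2.1 + 1
    let used := st.2.2 + 1
    if fill * 5 ≥ mask * 3 then pySetResize table used (if used > 50000 then used * 2 else used * 4)
    else (table, fill, used)

-- list(s) for s = set built by adding the (distinct) elements of xs in order: CPython iterates the slots in order
def pySetOrder (xs : List (Int × Int)) : List (Int × Int) :=
  let st := xs.foldl pySetAdd ((List.replicate 8 (none : Option ((Int × Int) × UInt64))).toArray, 0, 0)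
  st.1.foldl (fun acc e => match e with | some (k, _) => acc ++ [k] | none => acc) []


-- Python tuple comparison '(w1, r1) < (w2, r2)' for an int paired with an int pair (lexicographic)
def tupLt (w1 : Int) (r1 : Int × Int) (w2 : Int) (r2 : Int × Int) : Bool :=
  decide (w1 < w2 ∨ (w1 = w2 ∧ (r1.1 < r2.1 ∨ (r1.1 = r2.1 ∧ r1.2 < r2.2))))


-- ===== PORT A =====
-- UnionFind.__getitem__'s while loop: while root != path[-1]: path.append(root); root = self.parents[root]
def ufPath (parents : PySem.Dict (Int × Int) (Int × Int)) :
    Nat → List (Int × Int) → (Int × Int) → List (Int × Int) × (Int × Int)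
  | 0, path, root => (path, root)  -- fuel out: unreachable, the parent forest is acyclic
  | fuel + 1, path, root =>
    if root = path.getLastD (0, 0) then (path, root)  -- path is nonempty at every call
    else ufPath parents fuel (path ++ [root]) ((parents.get? root).getD root)
      -- 'self.parents[root]': every stored parent value is a key, so the KeyError default is never taken

-- UnionFind.__getitem__: returns (token, weights', parents')
def ufGet (W : PySem.Dict (Int × Int) Int) (par : PySem.Dict (Int × Int) (Int × Int)) (obj : Int × Int) :
    (Int × Int) × PySem.Dict (Int × Int) Int × PySem.Dict (Int × Int) (Int × Int) :=
  match par.get? obj with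
  | none => (obj, W.insert obj 1, par.insert obj obj)   -- previously unknown object
  | some r0 =>
    let pr := ufPath par (par.size + 1) [obj] r0
    (pr.2, W, pr.1.foldl (fun d a => d.insert a pr.2) par)   -- compress the path

-- UnionFind.union
def ufUnion (W : PySem.Dict (Int × Int) Int) (par : PySem.Dict (Int × Int) (Int × Int)) (o1 o2 : Int × Int) :
    PySem.Dict (Int × Int) Int × PySem.Dict (Int × Int) (Int × Int) :=
  let g1 := ufGet W par o1
  let g2 := ufGet g1.2.1 g1.2.2 o2
  -- heavier = max([(self.weights[r], r) for r in roots])[1]  (Python max of two (int, point) tuples)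
  let heavier := if tupLt ((g2.2.1.get? g1.1).getD 0) g1.1 ((g2.2.1.get? g2.1).getD 0) g2.1 then g2.1 else g1.1
  [g1.1, g2.1].foldl (fun st r =>
      if r ≠ heavier then
        (st.1.insert heavier ((st.1.get? heavier).getD 0 + (st.1.get? r).getD 0), st.2.insert r heavier)
      else st)
    (g2.2.1, g2.2.2)

def group_ex (pts : List (Int × Int)) (distx : Int) (disty : Int) : List (List (Int × Int)) :=
  let n : Int := pts.length
  let uf := (PySem.List.enumerate pts).foldl (fun st io =>
      (PySem.List.pyRange (io.1 + 1) n 1).foldl (fun st j =>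
          let o2 := (PySem.List.pyGet? pts j).getD (0, 0)   -- pts[j], j ∈ range(i+1, n): always in range
          if |io.2.1 - o2.1| ≤ distx ∧ |io.2.2 - o2.2| ≤ disty then ufUnion st.1 st.2 io.2 o2 else st)
        st)
    ((PySem.Dict.empty : PySem.Dict (Int × Int) Int), (PySem.Dict.empty : PySem.Dict (Int × Int) (Int × Int)))
  let fin := pts.foldl (fun st pt =>
      let g1 := ufGet st.2.1 st.2.2 pt                                -- U[pt] in 'sets.get(U[pt], set())'
      let s := (st.1.get? g1.1).getD (PySem.Set.empty)                -- set()
      let g2 := ufGet g1.2.1 g1.2.2 pt                                -- U[pt] again, in 'sets[U[pt]] = s'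
      (st.1.insert g2.1 (PySem.Set.add s pt), g2.2.1, g2.2.2))        -- s.add(pt); sets[U[pt]] = s
    ((PySem.Dict.empty : PySem.Dict (Int × Int) (List (Int × Int))), uf.1, uf.2)
  fin.1.values.map pySetOrder   -- [list(x) for x in sets.values()]: CPython set iteration order


-- ===== PORT B =====
def bEnsure (lab : PySem.Dict (Int × Int) (Int × Int)) (sz : PySem.Dict (Int × Int) Int) (p : Int × Int) :
    PySem.Dict (Int × Int) (Int × Int) × PySem.Dict (Int × Int) Int :=
  if lab.contains p then (lab, sz) else (lab.insert p p, sz.insert p 1)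

def bMerge (lab : PySem.Dict (Int × Int) (Int × Int)) (sz : PySem.Dict (Int × Int) Int) (o1 o2 : Int × Int) :
    PySem.Dict (Int × Int) (Int × Int) × PySem.Dict (Int × Int) Int :=
  let e1 := bEnsure lab sz o1
  let e2 := bEnsure e1.1 e1.2 o2
  let r1 := (e2.1.get? o1).getD o1   -- label[o1], present after ensure
  let r2 := (e2.1.get? o2).getD o2
  if r1 = r2 then e2
  else
    let hl := if tupLt ((e2.2.get? r1).getD 0) r1 ((e2.2.get? r2).getD 0) r2 then (r2, r1) else (r1, r2)
    -- for q in label: if label[q] == light: label[q] = heavy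
    let lab' := e2.1.keys.foldl (fun d q => if d.get? q = some hl.2 then d.insert q hl.1 else d) e2.1
    -- size[heavy] += size.pop(light)  (light's entry exists: every representative has a size)
    let w := (e2.2.get? hl.2).getD 0
    let sz1 := e2.2.erase hl.2
    (lab', sz1.insert hl.1 ((sz1.get? hl.1).getD 0 + w))

def group_ex_alt (pts : List (Int × Int)) (distx : Int) (disty : Int) : List (List (Int × Int)) :=
  let n : Int := pts.length
  let ls := (PySem.List.enumerate pts).foldl (fun st io =>
      (PySem.List.pyRange (io.1 + 1) n 1).foldl (fun st j =>
          let o2 := (PySem.List.pyGet? pts j).getD (0, 0)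
          if |io.2.1 - o2.1| ≤ distx ∧ |io.2.2 - o2.2| ≤ disty then bMerge st.1 st.2 io.2 o2 else st)
        st)
    ((PySem.Dict.empty : PySem.Dict (Int × Int) (Int × Int)), (PySem.Dict.empty : PySem.Dict (Int × Int) Int))
  let fin := pts.foldl (fun st pt =>
      let e := bEnsure st.2.1 st.2.2 pt
      let r := (e.1.get? pt).getD pt
      let s := (st.1.get? r).getD (PySem.Set.empty)
      (st.1.insert r (PySem.Set.add s pt), e.1, e.2))
    ((PySem.Dict.empty : PySem.Dict (Int × Int) (List (Int × Int))), ls.1, ls.2)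
  fin.1.values.map pySetOrder
-- ===== PRECONDITION & SPEC =====
def Spec_group_ex (pts : List (Int × Int)) (distx : Int) (disty : Int) (out : List (List (Int × Int))) : Prop := out = group_ex_alt pts distx disty
instance (pts : List (Int × Int)) (distx : Int) (disty : Int) (out : List (List (Int × Int))) : Decidable (Spec_group_ex pts distx disty out) := by unfold Spec_group_ex; infer_instance

-- ===== CLAIM (what is proved, stated in full; the proofs are below) =====
def Claim_equal_group_ex : Prop := ∀ (pts : List (Int × Int)) (distx : Int) (disty : Int), Dom_group_ex pts distx disty → Spec_group_ex pts distx disty (group_ex pts distx disty)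

-- ===== LEMMAS AND PROOFS =====

-- The coupling invariant between A's union-find state (W = weights, par = parents) and
-- B's flat state (lab = label, sz = size); d is a potential proving the parent forest acyclic.
-- It says: lab maps every tracked point directly to the root of its parent-chain in par,
-- and W agrees with sz on every representative.
structure UFInv (W : PySem.Dict (Int × Int) Int) (par lab : PySem.Dict (Int × Int) (Int × Int))
    (sz : PySem.Dict (Int × Int) Int) (d : (Int × Int) → Nat) : Prop where
  ndP : par.keys.Nodup
  ndL : lab.keys.Nodup
  dom : ∀ p, (par.get? p).isSome ↔ (lab.get? p).isSome
  step : ∀ p v, par.get? p = some v → lab.get? v = lab.get? p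
  root : ∀ p r, lab.get? p = some r → par.get? r = some r ∧ lab.get? r = some r
  desc : ∀ p v, par.get? p = some v → p ≠ v → d v < d p
  fix : ∀ p, par.get? p = some p → lab.get? p = some p
  wt : ∀ r, lab.get? r = some r → W.get? r = sz.get? r

def UFRel (stA : PySem.Dict (Int × Int) Int × PySem.Dict (Int × Int) (Int × Int))
    (stB : PySem.Dict (Int × Int) (Int × Int) × PySem.Dict (Int × Int) Int) : Prop :=
  ∃ d, UFInv stA.1 stA.2 stB.1 stB.2 d

lemma get?_erase_ne {ν : Type} (d : PySem.Dict (Int × Int) ν) (k k' : Int × Int) (h : k' ≠ k) :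
    (d.erase k).get? k' = d.get? k' := by
  obtain ⟨items⟩ := d
  simp only [PySem.Dict.erase, PySem.Dict.get?]
  congr 1
  induction items with
  | nil => rfl
  | cons a t ih =>
    by_cases hak : a.1 = k
    · have hq : (a.1 == k') = false := by simp [hak, Ne.symm h]
      simp only [List.filter_cons, List.find?_cons, hq]
      simp only [hak, beq_self_eq_true, Bool.not_true, Bool.false_eq_true, if_false, ih]
    · have hp : (!(a.1 == k)) = true := by simp [hak]
      simp only [List.filter_cons, hp, if_true, List.find?_cons]
      cases hq : (a.1 == k') <;> simp [ih]

-- B's relabel loop leaves the key list unchanged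
lemma relabel_keys (light heavy : Int × Int) (ks : List (Int × Int)) (d : PySem.Dict (Int × Int) (Int × Int)) :
    (ks.foldl (fun d q => if d.get? q = some light then d.insert q heavy else d) d).keys = d.keys := by
  induction ks generalizing d with
  | nil => rfl
  | cons q t ih =>
    simp only [List.foldl_cons]
    rw [ih]
    split
    next hq => exact PySem.Dict.keys_insert_of_contains _ _ (by rw [PySem.Dict.contains_eq_isSome_get?, hq]; rfl)
    next => rfl

-- B's relabel loop, characterised
lemma relabel_get? (light heavy : Int × Int) (ks : List (Int × Int)) (d : PySem.Dict (Int × Int) (Int × Int))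
    (hnd : ks.Nodup) (x : Int × Int) :
    (ks.foldl (fun d q => if d.get? q = some light then d.insert q heavy else d) d).get? x =
      if x ∈ ks ∧ d.get? x = some light then some heavy else d.get? x := by
  induction ks generalizing d with
  | nil => simp
  | cons q t ih =>
    simp only [List.foldl_cons]
    have hnd' := (List.nodup_cons.mp hnd).2
    have hq := (List.nodup_cons.mp hnd).1
    rw [ih _ hnd']
    by_cases hxq : x = q
    · subst hxq
      simp only [hq, List.mem_cons, true_or]
      split
      next hl => simp [PySem.Dict.get?_insert_self, hl]
      next hl => simp [hl]
    · have hget : (if d.get? q = some light then d.insert q heavy else d).get? x = d.get? x := by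
        split
        · exact PySem.Dict.get?_insert_of_ne _ _ hxq
        · rfl
      rw [hget]
      simp [List.mem_cons, hxq]

-- A's path-compression loop, characterised
lemma compress_get? (rt : Int × Int) (path : List (Int × Int)) (par : PySem.Dict (Int × Int) (Int × Int))
    (x : Int × Int) :
    (path.foldl (fun d a => d.insert a rt) par).get? x = if x ∈ path then some rt else par.get? x := by
  induction path generalizing par with
  | nil => simp
  | cons a t ih =>
    simp only [List.foldl_cons, ih, List.mem_cons]
    by_cases hx : x ∈ t
    · simp [hx]
    · by_cases hxa : x = a
      · simp [hxa, PySem.Dict.get?_insert_self]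
      · simp [hx, hxa, PySem.Dict.get?_insert_of_ne _ _ hxa]

lemma ufPath_spec (par lab : PySem.Dict (Int × Int) (Int × Int)) (d : (Int × Int) → Nat) (r : Int × Int)
    (hdom : ∀ p, (par.get? p).isSome ↔ (lab.get? p).isSome)
    (hstep : ∀ p v, par.get? p = some v → lab.get? v = lab.get? p)
    (hdesc : ∀ p v, par.get? p = some v → p ≠ v → d v < d p)
    (hfix : ∀ p, par.get? p = some p → lab.get? p = some p) :
    ∀ fuel (path : List (Int × Int)) root,
      path ≠ [] → path.Nodup →
      (∀ a ∈ path, (par.get? a).isSome ∧ lab.get? a = some r) →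
      par.get? (path.getLastD (0, 0)) = some root →
      lab.get? root = some r →
      (∀ a ∈ path, a ≠ path.getLastD (0, 0) → d (path.getLastD (0, 0)) < d a) →
      d root ≤ d (path.getLastD (0, 0)) →
      par.size + 1 ≤ fuel + path.length →
      (ufPath par fuel path root).2 = r ∧
        ∀ a ∈ (ufPath par fuel path root).1,
          (par.get? a).isSome ∧ lab.get? a = some r ∧ (a ≠ r → d r < d a) := by
  intro fuel
  induction fuel with
  | zero =>
    intro path root hne hnd hmem hlast hlabroot hmin hle hfuel
    exfalso
    have hsub : path ⊆ par.keys := by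
      intro a ha
      have h1 := (hmem a ha).1
      by_contra hnk
      rw [← PySem.Dict.get?_eq_none_iff_not_mem_keys] at hnk
      simp [hnk] at h1
    have hlen := (List.subperm_of_subset hnd hsub).length_le
    have hsz : par.keys.length = par.size := by
      simp [PySem.Dict.keys, PySem.Dict.size]
    omega
  | succ fuel ih =>
    intro path root hne hnd hmem hlast hlabroot hmin hle hfuel
    by_cases hstop : root = path.getLastD (0, 0)
    · -- the loop stops: root is its own parent, hence the common label r
      have hfixr : par.get? root = some root := by rw [hstop]; rw [hstop] at hlast; exact hlast
      have hlabself : lab.get? root = some root := hfix root hfixr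
      have hroot_r : root = r := by
        rw [hlabself] at hlabroot; exact (Option.some_inj.mp hlabroot)
      simp only [ufPath, if_pos hstop]
      refine ⟨hroot_r, fun a ha => ⟨(hmem a ha).1, (hmem a ha).2, fun har => ?_⟩⟩
      have h1 : a ≠ path.getLastD (0, 0) := by rw [← hstop, hroot_r]; exact har
      have h2 := hmin a ha h1
      rwa [← hstop, hroot_r] at h2
    · -- the loop appends root and follows its parent
      have hdlast : d root < d (path.getLastD (0, 0)) :=
        hdesc _ _ hlast (fun h => hstop h.symm)
      have hall : ∀ a ∈ path, d root < d a := by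
        intro a ha
        by_cases h : a = path.getLastD (0, 0)
        · rw [h]; exact hdlast
        · exact lt_trans hdlast (hmin a ha h)
      have hnotmem : root ∉ path := fun hin => lt_irrefl _ (hall root hin)
      have hsome : (par.get? root).isSome := (hdom root).mpr (by rw [hlabroot]; rfl)
      obtain ⟨rv, hrv⟩ := Option.isSome_iff_exists.mp hsome
      have hgetD : (par.get? root).getD root = rv := by rw [hrv]; rfl
      have hlastD : (path ++ [root]).getLastD (0, 0) = root := by
        simp
      have hres := ih (path ++ [root]) ((par.get? root).getD root)
        (by simp) (List.Nodup.append hnd (List.nodup_singleton root)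
          (fun x hx hx' => hnotmem ((List.mem_singleton.mp hx') ▸ hx)))
        (by intro a ha
            rcases List.mem_append.mp ha with h | h
            · exact hmem a h
            · rw [List.mem_singleton.mp h]; exact ⟨hsome, hlabroot⟩)
        (by rw [hlastD, hgetD]; exact hrv)
        (by rw [hgetD]; rw [hstep root rv hrv]; exact hlabroot)
        (by intro a ha har
            rw [hlastD]
            rw [hlastD] at har
            rcases List.mem_append.mp ha with h | h
            · exact hall a h
            · exact absurd (List.mem_singleton.mp h) har)
        (by rw [hlastD, hgetD]
            by_cases hrr : root = rv
            · rw [hrr]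
            · exact le_of_lt (hdesc root rv hrv hrr))
        (by simp only [List.length_append, List.length_singleton]; omega)
      simp only [ufPath, if_neg hstop]
      exact hres

lemma ensure_contains (lab : PySem.Dict (Int × Int) (Int × Int)) (sz : PySem.Dict (Int × Int) Int)
    (p : Int × Int) : (bEnsure lab sz p).1.contains p = true := by
  unfold bEnsure
  split
  next h => exact h
  next => simp [PySem.Dict.contains_insert_self]

lemma ensure_idem (lab : PySem.Dict (Int × Int) (Int × Int)) (sz : PySem.Dict (Int × Int) Int)
    (p : Int × Int) (h : lab.contains p = true) : bEnsure lab sz p = (lab, sz) := by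
  unfold bEnsure
  simp [h]

lemma ufGet_spec (W : PySem.Dict (Int × Int) Int) (par lab : PySem.Dict (Int × Int) (Int × Int))
    (sz : PySem.Dict (Int × Int) Int) (d : (Int × Int) → Nat) (h : UFInv W par lab sz d) (obj : Int × Int) :
    (∃ d', UFInv (ufGet W par obj).2.1 (ufGet W par obj).2.2 (bEnsure lab sz obj).1 (bEnsure lab sz obj).2 d') ∧
      (ufGet W par obj).1 = (((bEnsure lab sz obj).1.get? obj).getD obj) := by
  cases hobj : par.get? obj with
  | none =>
    have hlnone : lab.get? obj = none := by
      have hd := h.dom obj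
      rw [hobj] at hd
      simp only [Option.isSome_none] at hd
      exact Option.not_isSome_iff_eq_none.mp (by simpa using hd)
    have hens : bEnsure lab sz obj = (lab.insert obj obj, sz.insert obj 1) := by
      simp [bEnsure, PySem.Dict.contains_eq_isSome_get?, hlnone]
    have hget : ufGet W par obj = (obj, W.insert obj 1, par.insert obj obj) := by
      simp [ufGet, hobj]
    rw [hens, hget]
    constructor
    · refine ⟨d, ?_, ?_, ?_, ?_, ?_, ?_, ?_, ?_⟩
      · exact PySem.Dict.nodup_keys_insert _ _ _ h.ndP
      · exact PySem.Dict.nodup_keys_insert _ _ _ h.ndL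
      · intro p
        by_cases hp : p = obj
        · subst hp; simp [PySem.Dict.get?_insert_self]
        · rw [PySem.Dict.get?_insert_of_ne _ _ hp, PySem.Dict.get?_insert_of_ne _ _ hp]
          exact h.dom p
      · intro p v hpv
        by_cases hp : p = obj
        · subst hp
          rw [PySem.Dict.get?_insert_self] at hpv
          cases hpv; rfl
        · rw [PySem.Dict.get?_insert_of_ne _ _ hp] at hpv
          have hv : v ≠ obj := by
            intro hveq
            have hstep' := h.step p v hpv
            rw [hveq, hlnone] at hstep'
            have hd := (h.dom p).mp (by rw [hpv]; rfl)
            rw [← hstep'] at hd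
            simp at hd
          rw [PySem.Dict.get?_insert_of_ne _ _ hv, PySem.Dict.get?_insert_of_ne _ _ hp]
          exact h.step p v hpv
      · intro p r hpr
        by_cases hp : p = obj
        · subst hp
          rw [PySem.Dict.get?_insert_self] at hpr
          cases hpr
          simp [PySem.Dict.get?_insert_self]
        · rw [PySem.Dict.get?_insert_of_ne _ _ hp] at hpr
          have hro := h.root p r hpr
          have hr : r ≠ obj := by
            intro he
            rw [he, hlnone] at hro
            exact absurd hro.2.symm (Option.some_ne_none _)
          rw [PySem.Dict.get?_insert_of_ne _ _ hr, PySem.Dict.get?_insert_of_ne _ _ hr]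
          exact hro
      · intro p v hpv hne
        by_cases hp : p = obj
        · subst hp
          rw [PySem.Dict.get?_insert_self] at hpv
          cases hpv
          exact absurd rfl hne
        · rw [PySem.Dict.get?_insert_of_ne _ _ hp] at hpv
          exact h.desc p v hpv hne
      · intro p hpp
        by_cases hp : p = obj
        · subst hp; simp [PySem.Dict.get?_insert_self]
        · rw [PySem.Dict.get?_insert_of_ne _ _ hp] at hpp ⊢
          exact h.fix p hpp
      · intro r hrr
        by_cases hr : r = obj
        · subst hr; simp [PySem.Dict.get?_insert_self]
        · rw [PySem.Dict.get?_insert_of_ne _ _ hr] at hrr ⊢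
          rw [PySem.Dict.get?_insert_of_ne _ _ hr]
          exact h.wt r hrr
    · simp [PySem.Dict.get?_insert_self]
  | some r0 =>
    have hlsome : (lab.get? obj).isSome := (h.dom obj).mp (by rw [hobj]; rfl)
    obtain ⟨r, hr⟩ := Option.isSome_iff_exists.mp hlsome
    have hens : bEnsure lab sz obj = (lab, sz) := by
      simp [bEnsure, PySem.Dict.contains_eq_isSome_get?, hr]
    have hlabr0 : lab.get? r0 = some r := by rw [h.step obj r0 hobj, hr]
    have hpath := ufPath_spec par lab d r h.dom h.step h.desc h.fix (par.size + 1) [obj] r0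
      (by simp) (List.nodup_singleton obj)
      (by intro a ha; rw [List.mem_singleton.mp ha]; exact ⟨by rw [hobj]; rfl, hr⟩)
      (by simpa using hobj) hlabr0
      (by intro a ha hne; exact absurd (List.mem_singleton.mp ha) hne)
      (by by_cases hro : r0 = obj
          · rw [hro]; simp
          · simpa using le_of_lt (h.desc obj r0 hobj (fun he => hro he.symm)))
      (by simp)
    obtain ⟨hres2, hresmem⟩ := hpath
    have hroot := h.root obj r hr
    have hget : ufGet W par obj =
        ((ufPath par (par.size + 1) [obj] r0).2, W,
          (ufPath par (par.size + 1) [obj] r0).1.foldl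
            (fun d a => d.insert a (ufPath par (par.size + 1) [obj] r0).2) par) := by
      simp [ufGet, hobj]
    rw [hens, hget]
    constructor
    · refine ⟨d, ?_, h.ndL, ?_, ?_, ?_, ?_, ?_, h.wt⟩
      · exact PySem.Dict.nodup_keys_foldl_insert _ _ _ h.ndP
      · intro p
        rw [compress_get?]
        split
        next hp => rw [hres2]; simp [(hresmem p hp).2.1]
        next => exact h.dom p
      · intro p v hpv
        rw [compress_get?] at hpv
        split at hpv
        next hp =>
          cases hpv
          rw [hres2, hroot.2, (hresmem p hp).2.1]
        next => exact h.step p v hpv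
      · intro p r' hpr'
        obtain ⟨hpr1, hpr2⟩ := h.root p r' hpr'
        refine ⟨?_, hpr2⟩
        rw [compress_get?]
        split
        next hp =>
          have := (hresmem r' hp).2.1
          rw [hpr2] at this
          cases this
          rw [hres2]
        next => exact hpr1
      · intro p v hpv hne
        rw [compress_get?] at hpv
        split at hpv
        next hp =>
          cases hpv
          rw [hres2]
          exact (hresmem p hp).2.2 (fun hpr => hne (by rw [hpr, ← hres2]))
        next => exact h.desc p v hpv hne
      · intro p hpp
        rw [compress_get?] at hpp
        split at hpp
        next hp =>
          injection hpp with hpeq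
          rw [← hpeq, hres2]
          exact hroot.2
        next => exact h.fix p hpp
    · rw [hres2, hr]
      rfl

lemma ensure_get?_same (lab : PySem.Dict (Int × Int) (Int × Int)) (sz : PySem.Dict (Int × Int) Int)
    (q x : Int × Int) (hx : lab.contains x = true) : (bEnsure lab sz q).1.get? x = lab.get? x := by
  unfold bEnsure
  split
  next => rfl
  next hq =>
    dsimp only
    by_cases hxq : x = q
    · subst hxq; exact absurd hx hq
    · exact PySem.Dict.get?_insert_of_ne _ _ hxq

-- the heart of the union step: A links light beneath heavy, B relabels light's class to heavy
lemma relabel_inv (W2 : PySem.Dict (Int × Int) Int) (par2 lab2 : PySem.Dict (Int × Int) (Int × Int))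
    (sz2 : PySem.Dict (Int × Int) Int) (d2 : (Int × Int) → Nat) (hI : UFInv W2 par2 lab2 sz2 d2)
    (heavy light : Int × Int) (hne : heavy ≠ light)
    (hh : lab2.get? heavy = some heavy) (hl : lab2.get? light = some light) :
    UFRel (W2.insert heavy ((W2.get? heavy).getD 0 + (W2.get? light).getD 0), par2.insert light heavy)
          (lab2.keys.foldl (fun d q => if d.get? q = some light then d.insert q heavy else d) lab2,
           (sz2.erase light).insert heavy (((sz2.erase light).get? heavy).getD 0 + (sz2.get? light).getD 0)) := by
  have hL : ∀ x, (lab2.keys.foldl (fun d q => if d.get? q = some light then d.insert q heavy else d) lab2).get? x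
      = if lab2.get? x = some light then some heavy else lab2.get? x := by
    intro x
    rw [relabel_get? light heavy lab2.keys lab2 hI.ndL x]
    by_cases hx : lab2.get? x = some light
    · have hmem : x ∈ lab2.keys := by
        by_contra hnm
        rw [← PySem.Dict.get?_eq_none_iff_not_mem_keys] at hnm
        rw [hnm] at hx
        exact Option.some_ne_none _ hx.symm
      simp [hx, hmem]
    · simp [hx]
  have hph := (hI.root heavy heavy hh).1
  have hpl := (hI.root light light hl).1
  have hlabne : (some heavy : Option (Int × Int)) ≠ some light := fun hc => hne (Option.some_inj.mp hc)
  refine ⟨fun p => if lab2.get? p = some light then d2 p + d2 heavy + 1 else d2 p, ?_, ?_, ?_, ?_, ?_, ?_, ?_, ?_⟩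
  · exact PySem.Dict.nodup_keys_insert _ _ _ hI.ndP
  · rw [relabel_keys]; exact hI.ndL
  · intro p
    rw [hL]
    by_cases hp : p = light
    · subst hp
      rw [PySem.Dict.get?_insert_self, hl]
      simp
    · rw [PySem.Dict.get?_insert_of_ne _ _ hp]
      by_cases hc : lab2.get? p = some light
      · simp [hc, (hI.dom p).mpr (by rw [hc]; rfl)]
      · simp only [hc]
        exact hI.dom p
  · intro p v hpv
    by_cases hp : p = light
    · subst hp
      rw [PySem.Dict.get?_insert_self] at hpv
      cases hpv
      rw [hL, hL, hh, hl]
      simp [hlabne]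
    · rw [PySem.Dict.get?_insert_of_ne _ _ hp] at hpv
      have := hI.step p v hpv
      rw [hL, hL, this]
  · intro p r' hpr'
    rw [hL] at hpr'
    split at hpr'
    next hc =>
      cases hpr'
      refine ⟨?_, ?_⟩
      · rw [PySem.Dict.get?_insert_of_ne _ _ hne]; exact hph
      · rw [hL, hh]; simp [hlabne]
    next hc =>
      obtain ⟨hp1, hp2⟩ := hI.root p r' hpr'
      have hr'ne : r' ≠ light := by
        intro he; subst he; exact hc hpr'
      refine ⟨?_, ?_⟩
      · rw [PySem.Dict.get?_insert_of_ne _ _ hr'ne]; exact hp1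
      · rw [hL, hp2, if_neg (fun hc2 => hr'ne (Option.some_inj.mp hc2))]
  · intro p v hpv hnepv
    by_cases hp : p = light
    · subst hp
      rw [PySem.Dict.get?_insert_self] at hpv
      cases hpv
      rw [hl, hh, if_neg hlabne, if_pos rfl]
      omega
    · rw [PySem.Dict.get?_insert_of_ne _ _ hp] at hpv
      have hd := hI.desc p v hpv hnepv
      have hsame := hI.step p v hpv
      rw [hsame]
      by_cases hc : lab2.get? p = some light
      · rw [hc, if_pos rfl, if_pos rfl]; omega
      · rw [if_neg hc, if_neg hc]; omega
  · intro p hpp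
    by_cases hp : p = light
    · subst hp
      rw [PySem.Dict.get?_insert_self] at hpp
      exact absurd (Option.some_inj.mp hpp) hne
    · rw [PySem.Dict.get?_insert_of_ne _ _ hp] at hpp
      have := hI.fix p hpp
      rw [hL, this, if_neg (fun hc => hp (Option.some_inj.mp hc))]
  · intro r' hr'
    rw [hL] at hr'
    split at hr'
    next hc =>
      cases hr'
      rw [hc] at hh
      exact absurd hh.symm hlabne
    next hc =>
      have hr'l : r' ≠ light := fun he => hc (he ▸ hr')
      by_cases hr'h : r' = heavy
      · rw [hr'h, PySem.Dict.get?_insert_self, PySem.Dict.get?_insert_self,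
          get?_erase_ne sz2 light heavy hne, ← hI.wt heavy hh, ← hI.wt light hl]
      · rw [PySem.Dict.get?_insert_of_ne _ _ hr'h, PySem.Dict.get?_insert_of_ne _ _ hr'h,
          get?_erase_ne sz2 light r' hr'l]
        exact hI.wt r' hr'

lemma merge_spec (W : PySem.Dict (Int × Int) Int) (par lab : PySem.Dict (Int × Int) (Int × Int))
    (sz : PySem.Dict (Int × Int) Int) (d : (Int × Int) → Nat) (h : UFInv W par lab sz d) (o1 o2 : Int × Int) :
    UFRel (ufUnion W par o1 o2) (bMerge lab sz o1 o2) := by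
  obtain ⟨⟨d1, hI1⟩, hre1⟩ := ufGet_spec W par lab sz d h o1
  obtain ⟨⟨d2, hI2⟩, hre2⟩ := ufGet_spec (ufGet W par o1).2.1 (ufGet W par o1).2.2
      (bEnsure lab sz o1).1 (bEnsure lab sz o1).2 d1 hI1 o2
  have hk1 : (bEnsure lab sz o1).1.contains o1 = true := ensure_contains lab sz o1
  have hg1 : (bEnsure (bEnsure lab sz o1).1 (bEnsure lab sz o1).2 o2).1.get? o1
      = (bEnsure lab sz o1).1.get? o1 := ensure_get?_same _ _ _ _ hk1
  have hk2 : (bEnsure (bEnsure lab sz o1).1 (bEnsure lab sz o1).2 o2).1.contains o2 = true :=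
    ensure_contains _ _ o2
  obtain ⟨r1, hr1⟩ : ∃ r, (bEnsure (bEnsure lab sz o1).1 (bEnsure lab sz o1).2 o2).1.get? o1 = some r := by
    rw [hg1]
    exact Option.isSome_iff_exists.mp (by rw [← PySem.Dict.contains_eq_isSome_get?]; exact hk1)
  obtain ⟨r2, hr2⟩ : ∃ r, (bEnsure (bEnsure lab sz o1).1 (bEnsure lab sz o1).2 o2).1.get? o2 = some r :=
    Option.isSome_iff_exists.mp (by rw [← PySem.Dict.contains_eq_isSome_get?]; exact hk2)
  have hA1 : (ufGet W par o1).1 = r1 := by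
    rw [hre1]
    rw [hg1] at hr1
    rw [hr1]
    rfl
  have hA2 : (ufGet (ufGet W par o1).2.1 (ufGet W par o1).2.2 o2).1 = r2 := by
    rw [hre2, hr2]
    rfl
  have hroots1 := hI2.root o1 r1 hr1
  have hroots2 := hI2.root o2 r2 hr2
  have hw1 := hI2.wt r1 hroots1.2
  have hw2 := hI2.wt r2 hroots2.2
  simp only [ufUnion, bMerge]
  rw [hA1, hA2, hr1, hr2]
  simp only [Option.getD_some]
  rw [hw1, hw2]
  by_cases hrr : r1 = r2
  · subst hrr
    rw [ite_self]
    simp only [List.foldl_cons, List.foldl_nil, ne_eq, not_true_eq_false, ite_false]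
    simp only [if_true]
    exact ⟨d2, hI2⟩
  · rw [if_neg hrr]
    by_cases ht : tupLt (((bEnsure (bEnsure lab sz o1).1 (bEnsure lab sz o1).2 o2).2.get? r1).getD 0) r1
        (((bEnsure (bEnsure lab sz o1).1 (bEnsure lab sz o1).2 o2).2.get? r2).getD 0) r2 = true
    · rw [if_pos ht, if_pos ht]
      simp only [List.foldl_cons, List.foldl_nil]
      rw [if_pos (show r1 ≠ r2 from hrr)]
      rw [if_neg (show ¬ (r2 ≠ r2) from fun hx => hx rfl)]
      exact relabel_inv _ _ _ _ d2 hI2 r2 r1 (fun he => hrr he.symm) hroots2.2 hroots1.2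
    · rw [if_neg ht, if_neg ht]
      simp only [List.foldl_cons, List.foldl_nil]
      rw [if_neg (show ¬ (r1 ≠ r1) from fun hx => hx rfl)]
      rw [if_pos (show r2 ≠ r1 from fun he => hrr he.symm)]
      exact relabel_inv _ _ _ _ d2 hI2 r1 r2 hrr hroots1.2 hroots2.2

lemma inner_spec (pts : List (Int × Int)) (distx disty : Int) (o1 : Int × Int) (js : List Int) :
    ∀ stA stB, UFRel stA stB →
      UFRel (js.foldl (fun st j =>
              let o2 := (PySem.List.pyGet? pts j).getD (0, 0)
              if |o1.1 - o2.1| ≤ distx ∧ |o1.2 - o2.2| ≤ disty then ufUnion st.1 st.2 o1 o2 else st) stA)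
          (js.foldl (fun st j =>
              let o2 := (PySem.List.pyGet? pts j).getD (0, 0)
              if |o1.1 - o2.1| ≤ distx ∧ |o1.2 - o2.2| ≤ disty then bMerge st.1 st.2 o1 o2 else st) stB) := by
  induction js with
  | nil => intro stA stB h; simpa using h
  | cons j t ih =>
    intro stA stB h
    simp only [List.foldl_cons]
    apply ih
    dsimp only
    split
    · obtain ⟨d, hI⟩ := h
      exact merge_spec stA.1 stA.2 stB.1 stB.2 d hI _ _
    · exact h

lemma outer_spec (pts : List (Int × Int)) (distx disty n : Int) (ios : List (Int × (Int × Int))) :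
    ∀ stA stB, UFRel stA stB →
      UFRel (ios.foldl (fun st io =>
              (PySem.List.pyRange (io.1 + 1) n 1).foldl (fun st j =>
                  let o2 := (PySem.List.pyGet? pts j).getD (0, 0)
                  if |io.2.1 - o2.1| ≤ distx ∧ |io.2.2 - o2.2| ≤ disty then ufUnion st.1 st.2 io.2 o2 else st) st) stA)
          (ios.foldl (fun st io =>
              (PySem.List.pyRange (io.1 + 1) n 1).foldl (fun st j =>
                  let o2 := (PySem.List.pyGet? pts j).getD (0, 0)
                  if |io.2.1 - o2.1| ≤ distx ∧ |io.2.2 - o2.2| ≤ disty then bMerge st.1 st.2 io.2 o2 else st) st) stB) := by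
  induction ios with
  | nil => intro stA stB h; simpa using h
  | cons io t ih =>
    intro stA stB h
    simp only [List.foldl_cons]
    exact ih _ _ (inner_spec pts distx disty io.2 _ stA stB h)

lemma final_spec (pts : List (Int × Int)) :
    ∀ (g : PySem.Dict (Int × Int) (List (Int × Int))) stA stB, UFRel stA stB →
      (pts.foldl (fun st pt =>
          let g1 := ufGet st.2.1 st.2.2 pt
          let s := (st.1.get? g1.1).getD PySem.Set.empty
          let g2 := ufGet g1.2.1 g1.2.2 pt
          (st.1.insert g2.1 (PySem.Set.add s pt), g2.2.1, g2.2.2))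
        (g, stA.1, stA.2)).1 =
      (pts.foldl (fun st pt =>
          let e := bEnsure st.2.1 st.2.2 pt
          let r := (e.1.get? pt).getD pt
          let s := (st.1.get? r).getD PySem.Set.empty
          (st.1.insert r (PySem.Set.add s pt), e.1, e.2))
        (g, stB.1, stB.2)).1 := by
  induction pts with
  | nil => intro g stA stB _; rfl
  | cons pt t ih =>
    intro g stA stB h
    obtain ⟨d, hI⟩ := h
    obtain ⟨⟨d1, hI1⟩, hr1⟩ := ufGet_spec stA.1 stA.2 stB.1 stB.2 d hI pt
    have hens : bEnsure (bEnsure stB.1 stB.2 pt).1 (bEnsure stB.1 stB.2 pt).2 pt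
        = ((bEnsure stB.1 stB.2 pt).1, (bEnsure stB.1 stB.2 pt).2) :=
      ensure_idem _ _ _ (ensure_contains _ _ _)
    obtain ⟨⟨d2, hI2⟩, hr2⟩ := ufGet_spec (ufGet stA.1 stA.2 pt).2.1 (ufGet stA.1 stA.2 pt).2.2
      (bEnsure stB.1 stB.2 pt).1 (bEnsure stB.1 stB.2 pt).2 d1 hI1 pt
    rw [hens] at hr2 hI2
    simp only [List.foldl_cons]
    rw [hr1, hr2]
    exact ih _ _ _ ⟨d2, hI2⟩

lemma rel_empty : UFRel (PySem.Dict.empty, PySem.Dict.empty) (PySem.Dict.empty, PySem.Dict.empty) := by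
  refine ⟨fun _ => 0, ?_, ?_, ?_, ?_, ?_, ?_, ?_, ?_⟩ <;>
    simp [PySem.Dict.get?_empty]

-- ===== VERDICT (by name: the statement is the Claim_ definition above) =====
theorem group_ex_spec : Claim_equal_group_ex := by
  intro pts distx disty _
  unfold Spec_group_ex group_ex group_ex_alt
  have h := outer_spec pts distx disty (pts.length : Int) (PySem.List.enumerate pts)
    (PySem.Dict.empty, PySem.Dict.empty) (PySem.Dict.empty, PySem.Dict.empty) rel_empty
  have h2 := final_spec pts PySem.Dict.empty _ _ h
  simpa using congrArg (fun z => z.map pySetOrder) (congrArg PySem.Dict.values h2)
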